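-- pv_equiv track=rewrite | github.com/Activer007/computer_use_ootb | computer_use_demo/executor/showui_executor.py | _json_literals_to_python
-- ===== SOURCE A (Python) =====
-- def _json_literals_to_python(text: str) -> str:
--     """Convert JSON literal tokens to Python equivalents without touching quoted strings."""
--
--     def is_escaped(idx: int) -> bool:
--         backslash_count = 0
--         j = idx - 1
--         while j >= 0 and text[j] == "\\":
--             backslash_count += 1
--             j -= 1
--         return backslash_count % 2 == 1
--
--     result: list[str] = []
--     in_single_quote = False
--     in_double_quote = False
--     i = 0
--     length = len(text)
--
--     while i < length:
--         ch = text[i]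
--
--         if ch == "'" and not in_double_quote and not is_escaped(i):
--             in_single_quote = not in_single_quote
--             result.append(ch)
--             i += 1
--             continue
--
--         if ch == '"' and not in_single_quote and not is_escaped(i):
--             in_double_quote = not in_double_quote
--             result.append(ch)
--             i += 1
--             continue
--
--         if not in_single_quote and not in_double_quote:
--             if text.startswith("null", i):
--                 result.append("None")
--                 i += 4
--                 continue
--             if text.startswith("true", i):
--                 result.append("True")
--                 i += 4
--                 continue
--             if text.startswith("false", i):
--                 result.append("False")
--                 i += 5
--                 continue
--
--         result.append(ch)
--         i += 1
--
--     return ''.join(result)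
-- ===== SOURCE B (Python) =====
-- def _json_literals_to_python(text: str) -> str:
--     """Two-pass: first mark which characters lie outside quoted strings (tracking
--     backslash-escape parity incrementally), then replace literal tokens at marked
--     positions in a second pass that has no quote/escape logic at all."""
--     # pass 1: outside-string flags
--     flags = []
--     in_s = in_d = False
--     esc = False
--     for ch in text:
--         if ch == "'" and not in_d and not esc:
--             in_s = not in_s
--             flags.append(False)
--             esc = False
--         elif ch == '"' and not in_s and not esc:
--             in_d = not in_d
--             flags.append(False)
--             esc = False
--         else:
--             flags.append(not in_s and not in_d)
--             esc = (not esc) if ch == "\\" else False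
--     # pass 2: replace literal tokens starting at outside positions
--     out = []
--     i = 0
--     n = len(text)
--     while i < n:
--         if flags[i]:
--             if text.startswith("null", i):
--                 out.append("None")
--                 i += 4
--                 continue
--             if text.startswith("true", i):
--                 out.append("True")
--                 i += 4
--                 continue
--             if text.startswith("false", i):
--                 out.append("False")
--                 i += 5
--                 continue
--         out.append(text[i])
--         i += 1
--     return ''.join(out)
-- ===== Notes on version B (the rewrite author's own statement) =====
-- stated objective: alternative
-- what changed: B is a two-pass decomposition: pass 1 annotates every character with an outside-quoted-string flag using incrementally maintained backslash-escape parity (no per-quote backward rescan), pass 2 replaces the literal tokens at flagged positions with no quote or escape logic at all; A is one interleaved loop that rescans the preceding backslash run at every quote.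
import Mathlib
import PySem

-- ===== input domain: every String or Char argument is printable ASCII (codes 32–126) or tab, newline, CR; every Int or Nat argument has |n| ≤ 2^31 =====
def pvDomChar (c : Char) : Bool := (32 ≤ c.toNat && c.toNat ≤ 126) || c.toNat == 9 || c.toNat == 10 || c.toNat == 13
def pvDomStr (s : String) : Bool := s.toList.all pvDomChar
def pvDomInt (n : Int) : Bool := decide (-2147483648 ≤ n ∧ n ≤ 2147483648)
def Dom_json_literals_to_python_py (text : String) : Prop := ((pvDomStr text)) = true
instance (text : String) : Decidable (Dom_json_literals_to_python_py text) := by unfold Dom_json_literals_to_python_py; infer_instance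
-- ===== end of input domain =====

-- B splits the work into two passes: first annotate every character with an
-- outside-quoted-string flag (incremental escape parity), then a quote-free
-- replacement pass over the flagged text (alternative decomposition).

-- ===== PORT A =====
-- A's is_escaped: the backward while-loop counting backslashes at positions
-- idx-1, idx-2, … is a scan over `prev`, the reversed prefix text[0:i]
def aCountBS : List Char → Nat
  | '\\' :: rest => aCountBS rest + 1
  | _ => 0

def aIsEscaped (prev : List Char) : Bool := aCountBS prev % 2 == 1

-- A's while loop; `prev` is the reversed prefix text[0:i], `rest` is text[i:];
-- text.startswith(w, i) is w.toList.isPrefixOf rest, i += len(w) is rest.drop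
def aLoop (prev rest : List Char) (inS inD : Bool) : List Char :=
  match rest with
  | [] => []
  | ch :: rs =>
    if ch == '\'' && !inD && !aIsEscaped prev then
      ch :: aLoop (ch :: prev) rs (!inS) inD
    else if ch == '"' && !inS && !aIsEscaped prev then
      ch :: aLoop (ch :: prev) rs inS (!inD)
    else if !inS && !inD then
      if List.isPrefixOf "null".toList (ch :: rs) then
        "None".toList ++ aLoop (((ch :: rs).take 4).reverse ++ prev) ((ch :: rs).drop 4) inS inD
      else if List.isPrefixOf "true".toList (ch :: rs) then
        "True".toList ++ aLoop (((ch :: rs).take 4).reverse ++ prev) ((ch :: rs).drop 4) inS inD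
      else if List.isPrefixOf "false".toList (ch :: rs) then
        "False".toList ++ aLoop (((ch :: rs).take 5).reverse ++ prev) ((ch :: rs).drop 5) inS inD
      else
        ch :: aLoop (ch :: prev) rs inS inD
    else
      ch :: aLoop (ch :: prev) rs inS inD
termination_by rest.length
decreasing_by all_goals simp

def json_literals_to_python_py (text : String) : String :=
  String.ofList (aLoop [] text.toList false false)

-- ===== PORT B =====
-- pass 1: annotate each character with its outside-quoted-string flag,
-- carrying (in_s, in_d, esc); esc is the incremental backslash-run parity
def bAnnotate (rest : List Char) (inS inD esc : Bool) : List (Char × Bool) :=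
  match rest with
  | [] => []
  | ch :: rs =>
    if ch == '\'' && !inD && !esc then
      (ch, false) :: bAnnotate rs (!inS) inD false
    else if ch == '"' && !inS && !esc then
      (ch, false) :: bAnnotate rs inS (!inD) false
    else
      (ch, !inS && !inD) :: bAnnotate rs inS inD (if ch == '\\' then !esc else false)

-- pass 2: replace literal tokens at flagged positions; the flagged list plays
-- the role of (text, flags) indexed by i, map Prod.fst recovers text[i:]
def bReplace (rest : List (Char × Bool)) : List Char :=
  match rest with
  | [] => []
  | (ch, f) :: rs =>
    if f && List.isPrefixOf "null".toList (ch :: rs.map Prod.fst) then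
      "None".toList ++ bReplace (rs.drop 3)
    else if f && List.isPrefixOf "true".toList (ch :: rs.map Prod.fst) then
      "True".toList ++ bReplace (rs.drop 3)
    else if f && List.isPrefixOf "false".toList (ch :: rs.map Prod.fst) then
      "False".toList ++ bReplace (rs.drop 4)
    else
      ch :: bReplace rs
termination_by rest.length
decreasing_by all_goals (simp; try omega)

def json_literals_to_python_py_alt (text : String) : String :=
  String.ofList (bReplace (bAnnotate text.toList false false false))

-- ===== PRECONDITION & SPEC =====
def Spec_json_literals_to_python_py (text : String) (out : String) : Prop := out = json_literals_to_python_py_alt text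
instance (text : String) (out : String) : Decidable (Spec_json_literals_to_python_py text out) := by unfold Spec_json_literals_to_python_py; infer_instance

-- ===== CLAIM (what is proved, stated in full; the proofs are below) =====
def Claim_equal_json_literals_to_python_py : Prop := ∀ (text : String), Dom_json_literals_to_python_py text → Spec_json_literals_to_python_py text (json_literals_to_python_py text)

-- ===== LEMMAS AND PROOFS =====

theorem aCountBS_cons_nonbs (ch : Char) (prev : List Char) (h : ch ≠ '\\') :
    aCountBS (ch :: prev) = 0 := by
  rw [aCountBS.eq_def]
  split
  · simp_all
  · rfl

theorem aIsEscaped_cons (ch : Char) (prev : List Char) :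
    aIsEscaped (ch :: prev) = (if ch == '\\' then !aIsEscaped prev else false) := by
  by_cases h : ch = '\\'
  · subst h
    simp only [aIsEscaped, aCountBS, beq_self_eq_true, if_pos]
    rcases Nat.mod_two_eq_zero_or_one (aCountBS prev) with h0 | h1
    · simp [Nat.add_mod, h0]
    · simp [Nat.add_mod, h1]
  · simp [aIsEscaped, aCountBS_cons_nonbs ch prev h, h]

theorem aIsEscaped_nonbs (ch : Char) (prev : List Char) (h : ch ≠ '\\') :
    aIsEscaped (ch :: prev) = false := by
  simp [aIsEscaped, aCountBS_cons_nonbs ch prev h]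

theorem bAnnotate_fst (rest : List Char) (inS inD esc : Bool) :
    (bAnnotate rest inS inD esc).map Prod.fst = rest := by
  induction rest generalizing inS inD esc with
  | nil => rfl
  | cons ch rs ih =>
    rw [bAnnotate]
    split_ifs <;> simp [ih]

-- one annotation step for a character that is not a quote and not a backslash
theorem bAnnotate_plain (ch : Char) (rs : List Char) (inS inD esc : Bool)
    (h1 : ch ≠ '\'') (h2 : ch ≠ '"') (h3 : ch ≠ '\\') :
    bAnnotate (ch :: rs) inS inD esc
      = (ch, !inS && !inD) :: bAnnotate rs inS inD false := by
  rw [bAnnotate]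
  simp [h1, h2, h3]

-- one annotation step when neither quote-toggle condition fires
theorem bAnnotate_step (ch : Char) (rs : List Char) (inS inD esc : Bool)
    (h1 : ¬(ch == '\'' && !inD && !esc) = true)
    (h2 : ¬(ch == '"' && !inS && !esc) = true) :
    bAnnotate (ch :: rs) inS inD esc
      = (ch, !inS && !inD) :: bAnnotate rs inS inD (if ch == '\\' then !esc else false) := by
  rw [bAnnotate, if_neg h1, if_neg h2]

-- bReplace on a cell whose flag is false just copies the character
theorem bReplace_flagfalse (ch : Char) (rs : List (Char × Bool)) :
    bReplace ((ch, false) :: rs) = ch :: bReplace rs := by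
  rw [bReplace]
  simp

theorem loop_eq : ∀ (n : Nat) (rest prev : List Char) (inS inD : Bool), rest.length ≤ n →
    aLoop prev rest inS inD = bReplace (bAnnotate rest inS inD (aIsEscaped prev)) := by
  intro n
  induction n with
  | zero =>
    intro rest prev inS inD h
    cases rest with
    | nil => simp [aLoop, bAnnotate, bReplace]
    | cons ch rs => simp at h
  | succ n ih =>
    intro rest prev inS inD h
    cases rest with
    | nil => simp [aLoop, bAnnotate, bReplace]
    | cons ch rs =>
      simp only [List.length_cons, Nat.succ_le_succ_iff] at h
      by_cases h1 : (ch == '\'' && !inD && !aIsEscaped prev) = true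
      · -- single quote toggles
        have hc : ch = '\'' := by
          simp only [Bool.and_eq_true, beq_iff_eq] at h1; exact h1.1.1
        rw [aLoop, if_pos h1, bAnnotate, if_pos h1, bReplace_flagfalse]
        rw [ih rs (ch :: prev) (!inS) inD h, aIsEscaped_nonbs ch prev (by simp [hc])]
      · by_cases h2 : (ch == '"' && !inS && !aIsEscaped prev) = true
        · -- double quote toggles
          have hc : ch = '"' := by
            simp only [Bool.and_eq_true, beq_iff_eq] at h2; exact h2.1.1
          rw [aLoop, if_neg h1, if_pos h2, bAnnotate, if_neg h1, if_pos h2, bReplace_flagfalse]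
          rw [ih rs (ch :: prev) inS (!inD) h, aIsEscaped_nonbs ch prev (by simp [hc])]
        · by_cases h3 : (!inS && !inD) = true
          · by_cases h4 : List.isPrefixOf "null".toList (ch :: rs) = true
            · -- outside, "null" matches
              obtain ⟨t, htail⟩ := List.isPrefixOf_iff_prefix.mp h4
              have hsh : ch :: rs = 'n' :: 'u' :: 'l' :: 'l' :: t := by rw [← htail]; rfl
              obtain ⟨hch, hrs⟩ : ch = 'n' ∧ rs = 'u' :: 'l' :: 'l' :: t := List.cons_eq_cons.mp hsh
              have hlen : t.length ≤ n := by subst hrs; simp at h; omega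
              subst hch hrs
              rw [aLoop, if_neg h1, if_neg h2, if_pos h3, if_pos h4]
              rw [bAnnotate_plain _ _ _ _ _ (by decide) (by decide) (by decide),
                  bAnnotate_plain _ _ _ _ _ (by decide) (by decide) (by decide),
                  bAnnotate_plain _ _ _ _ _ (by decide) (by decide) (by decide),
                  bAnnotate_plain _ _ _ _ _ (by decide) (by decide) (by decide)]
              rw [bReplace]
              simp only [List.map_cons, bAnnotate_fst, h3, Bool.true_and]
              rw [if_pos h4]
              rw [show List.drop 4 ('n' :: 'u' :: 'l' :: 'l' :: t) = t from rfl,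
                  show List.drop 3 (('u', true) :: ('l', true) :: ('l', true) :: bAnnotate t inS inD false) = bAnnotate t inS inD false from rfl,
                  show ((List.take 4 ('n' :: 'u' :: 'l' :: 'l' :: t)).reverse ++ prev) = 'l' :: 'l' :: 'u' :: 'n' :: prev from rfl]
              rw [ih t _ _ _ hlen, aIsEscaped_nonbs _ _ (by decide)]
            · by_cases h5 : List.isPrefixOf "true".toList (ch :: rs) = true
              · -- outside, "true" matches
                obtain ⟨t, htail⟩ := List.isPrefixOf_iff_prefix.mp h5
                have hsh : ch :: rs = 't' :: 'r' :: 'u' :: 'e' :: t := by rw [← htail]; rfl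
                obtain ⟨hch, hrs⟩ : ch = 't' ∧ rs = 'r' :: 'u' :: 'e' :: t := List.cons_eq_cons.mp hsh
                have hlen : t.length ≤ n := by subst hrs; simp at h; omega
                subst hch hrs
                rw [aLoop, if_neg h1, if_neg h2, if_pos h3, if_neg h4, if_pos h5]
                rw [bAnnotate_plain _ _ _ _ _ (by decide) (by decide) (by decide),
                    bAnnotate_plain _ _ _ _ _ (by decide) (by decide) (by decide),
                    bAnnotate_plain _ _ _ _ _ (by decide) (by decide) (by decide),
                    bAnnotate_plain _ _ _ _ _ (by decide) (by decide) (by decide)]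
                rw [bReplace]
                simp only [List.map_cons, bAnnotate_fst, h3, Bool.true_and]
                rw [if_neg h4, if_pos h5]
                rw [show List.drop 4 ('t' :: 'r' :: 'u' :: 'e' :: t) = t from rfl,
                    show List.drop 3 (('r', true) :: ('u', true) :: ('e', true) :: bAnnotate t inS inD false) = bAnnotate t inS inD false from rfl,
                    show ((List.take 4 ('t' :: 'r' :: 'u' :: 'e' :: t)).reverse ++ prev) = 'e' :: 'u' :: 'r' :: 't' :: prev from rfl]
                rw [ih t _ _ _ hlen, aIsEscaped_nonbs _ _ (by decide)]
              · by_cases h6 : List.isPrefixOf "false".toList (ch :: rs) = true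
                · -- outside, "false" matches
                  obtain ⟨t, htail⟩ := List.isPrefixOf_iff_prefix.mp h6
                  have hsh : ch :: rs = 'f' :: 'a' :: 'l' :: 's' :: 'e' :: t := by rw [← htail]; rfl
                  obtain ⟨hch, hrs⟩ : ch = 'f' ∧ rs = 'a' :: 'l' :: 's' :: 'e' :: t := List.cons_eq_cons.mp hsh
                  have hlen : t.length ≤ n := by subst hrs; simp at h; omega
                  subst hch hrs
                  rw [aLoop, if_neg h1, if_neg h2, if_pos h3, if_neg h4, if_neg h5, if_pos h6]
                  rw [bAnnotate_plain _ _ _ _ _ (by decide) (by decide) (by decide),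
                      bAnnotate_plain _ _ _ _ _ (by decide) (by decide) (by decide),
                      bAnnotate_plain _ _ _ _ _ (by decide) (by decide) (by decide),
                      bAnnotate_plain _ _ _ _ _ (by decide) (by decide) (by decide),
                      bAnnotate_plain _ _ _ _ _ (by decide) (by decide) (by decide)]
                  rw [bReplace]
                  simp only [List.map_cons, bAnnotate_fst, h3, Bool.true_and]
                  rw [if_neg h4, if_neg h5, if_pos h6]
                  rw [show List.drop 5 ('f' :: 'a' :: 'l' :: 's' :: 'e' :: t) = t from rfl,
                      show List.drop 4 (('a', true) :: ('l', true) :: ('s', true) :: ('e', true) :: bAnnotate t inS inD false) = bAnnotate t inS inD false from rfl,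
                      show ((List.take 5 ('f' :: 'a' :: 'l' :: 's' :: 'e' :: t)).reverse ++ prev) = 'e' :: 's' :: 'l' :: 'a' :: 'f' :: prev from rfl]
                  rw [ih t _ _ _ hlen, aIsEscaped_nonbs _ _ (by decide)]
                · -- outside, no literal matches
                  rw [aLoop, if_neg h1, if_neg h2, if_pos h3, if_neg h4, if_neg h5, if_neg h6]
                  rw [bAnnotate_step _ _ _ _ _ h1 h2, bReplace]
                  simp only [bAnnotate_fst, h3, Bool.true_and]
                  rw [if_neg h4, if_neg h5, if_neg h6]
                  rw [ih rs (ch :: prev) inS inD h, aIsEscaped_cons]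
          · -- inside a string, non-toggling char
            have hflag : (!inS && !inD) = false := by
              revert h3; cases (!inS && !inD) <;> simp
            rw [aLoop, if_neg h1, if_neg h2, if_neg h3]
            rw [bAnnotate_step _ _ _ _ _ h1 h2, hflag, bReplace_flagfalse]
            rw [ih rs (ch :: prev) inS inD h, aIsEscaped_cons]

-- ===== VERDICT (by name: the statement is the Claim_ definition above) =====
theorem json_literals_to_python_py_spec : Claim_equal_json_literals_to_python_py := by
  intro text _
  unfold Spec_json_literals_to_python_py json_literals_to_python_py json_literals_to_python_py_alt
  rw [loop_eq text.toList.length text.toList [] false false (le_refl _)]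
  rfl
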